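-- pv_equiv track=rewrite | github.com/rbeard0330/AdventOfCode | robert/d15.py | oxy
-- ===== SOURCE A (Python) =====
-- def oxy(connections, start):
--     has_air = set()
--     no_air = {r for r in connections} - {start}
--     just_got_air = {start}
--     t = 0
--     while no_air:
--         t += 1
--         new_air = set()
--         has_air |= just_got_air
--         while just_got_air:
--             r = just_got_air.pop()
--             for neighb in connections[r]:
--                 if neighb not in has_air:
--                     new_air.add(neighb)
--                     no_air.discard(neighb)
--         just_got_air = new_air
--         if t > len(connections):
--             return False
--     return t
-- ===== SOURCE B (Python) =====
-- def oxy(connections, start):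
--     keys = {k for k in connections}
--     if not keys - {start}:
--         return 0
--     seen = {start}
--     t = 0
--     while not keys <= seen:
--         t += 1
--         seen = seen | {n for r in seen for n in connections[r]}
--         if t > len(connections):
--             return False
--     return t
-- ===== Notes on version B (the rewrite author's own statement) =====
-- stated objective: simpler
-- what changed: Replaced A's level-synchronous frontier BFS with three sets (has_air/just_got_air/no_air, inner pop loop, discard bookkeeping) by a plain fixed-point iteration: one 'seen' set that each round absorbs the neighbourhood of everything seen so far, stopping when it covers the keys.
-- outside the precondition, e.g. on oxy({1: [], 2: []}, 1): A returns False, B returns False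
import Mathlib
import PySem

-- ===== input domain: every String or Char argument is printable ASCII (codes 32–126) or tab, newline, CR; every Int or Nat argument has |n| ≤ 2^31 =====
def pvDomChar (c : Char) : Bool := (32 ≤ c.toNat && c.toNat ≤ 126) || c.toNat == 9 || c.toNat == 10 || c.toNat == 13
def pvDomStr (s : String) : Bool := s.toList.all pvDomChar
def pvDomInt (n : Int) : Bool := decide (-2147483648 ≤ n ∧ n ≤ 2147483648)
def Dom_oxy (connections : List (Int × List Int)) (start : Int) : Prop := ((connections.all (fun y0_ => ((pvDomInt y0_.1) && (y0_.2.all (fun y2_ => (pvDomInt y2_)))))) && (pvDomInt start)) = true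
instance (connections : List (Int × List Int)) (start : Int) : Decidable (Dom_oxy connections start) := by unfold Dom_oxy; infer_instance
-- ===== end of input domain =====

-- B replaces A's three-set frontier BFS by a fixed-point iteration of one 'seen' set (simpler; not faster).

-- ===== PORT A =====
-- inner 'while just_got_air: r = just_got_air.pop(); for neighb in connections[r]: …'
-- (set pop/iteration order is not modelled; the sets built here depend only on membership, and the
--  returned int only on membership/emptiness, so any consumption order gives Python's result.
--  connections[r] is d.getD r []: the KeyError case is excluded by Pre_oxy.)
def oxyInner (d : PySem.Dict Int (List Int)) (hasAir : PySem.Set Int) :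
    List Int → PySem.Set Int → PySem.Set Int → PySem.Set Int × PySem.Set Int
  | [], newAir, noAir => (newAir, noAir)
  | r :: rest, newAir, noAir =>
      let p := (d.getD r []).foldl
        (fun (p : PySem.Set Int × PySem.Set Int) nb =>
          if nb ∈ hasAir then p else (PySem.Set.add p.1 nb, PySem.Set.discard p.2 nb))
        (newAir, noAir)
      oxyInner d hasAir rest p.1 p.2

-- outer 'while no_air:' loop; 'return False' (a bool, not an int) is ported as 0 — Pre_oxy excludes those inputs
def oxyLoop (d : PySem.Dict Int (List Int)) (hasAir front noAir : PySem.Set Int) (t : Nat) : Int :=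
  if noAir = [] then (t : Int)
  else
    let hasAir' := PySem.Set.update hasAir front    -- has_air |= just_got_air
    let p := oxyInner d hasAir' front PySem.Set.empty noAir
    if _h : t + 1 > d.size then 0
    else oxyLoop d hasAir' p.1 p.2 (t + 1)
termination_by d.size + 1 - t
decreasing_by omega

def oxy (connections : List (Int × List Int)) (start : Int) : Int :=
  let d := PySem.Dict.ofList connections
  let hasAir : PySem.Set Int := PySem.Set.empty
  let noAir := PySem.Set.diff (PySem.Set.ofList d.keys) (PySem.Set.ofList [start])  -- {r for r in connections} - {start}
  let justGotAir := PySem.Set.ofList [start]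
  oxyLoop d hasAir justGotAir noAir 0

-- ===== PORT B =====
-- 'while not keys <= seen: seen = seen | {n for r in seen for n in connections[r]}'
def altLoop (d : PySem.Dict Int (List Int)) (keys seen : PySem.Set Int) (t : Nat) : Int :=
  if PySem.Set.issubset keys seen then (t : Int)
  else
    let seen' := PySem.Set.union seen (seen.flatMap (fun r => d.getD r []))
    if _h : t + 1 > d.size then 0   -- 'return False', excluded by Pre_oxy
    else altLoop d keys seen' (t + 1)
termination_by d.size + 1 - t
decreasing_by omega

def oxy_alt (connections : List (Int × List Int)) (start : Int) : Int :=
  let d := PySem.Dict.ofList connections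
  let keys := PySem.Set.ofList d.keys
  if PySem.Set.diff keys (PySem.Set.ofList [start]) = [] then 0
  else altLoop d keys (PySem.Set.ofList [start]) 0

-- ===== PRECONDITION & SPEC =====
-- pvBall d start t = the nodes within graph distance t of start (missing nodes have no out-edges)
def pvBall (d : PySem.Dict Int (List Int)) (start : Int) : Nat → PySem.Set Int
  | 0 => PySem.Set.ofList [start]
  | n + 1 =>
      let r := pvBall d start n
      PySem.Set.union r (r.flatMap (fun x => d.getD x []))

-- Pre_oxy holds exactly when A returns an int: every key is within distance |keys| of start (otherwise
-- A returns the bool False, not an int), and until the keys are covered the explored ball stays inside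
-- the keys (otherwise both A and B raise KeyError on a node that is not a dict key).
def Pre_oxy (connections : List (Int × List Int)) (start : Int) : Prop :=
  (∀ k ∈ (PySem.Dict.ofList connections).keys,
      k ∈ pvBall (PySem.Dict.ofList connections) start (PySem.Dict.ofList connections).size) ∧
  (∀ t < (PySem.Dict.ofList connections).size,
      (¬ ∀ k ∈ (PySem.Dict.ofList connections).keys, k ∈ pvBall (PySem.Dict.ofList connections) start t) →
      ∀ x ∈ pvBall (PySem.Dict.ofList connections) start t, x ∈ (PySem.Dict.ofList connections).keys)
instance (connections : List (Int × List Int)) (start : Int) : Decidable (Pre_oxy connections start) := by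
  unfold Pre_oxy; infer_instance

def pvWitness_oxy : (List (Int × List Int)) × Int := ([(1, [2]), (2, [1])], 1)

def Spec_oxy (connections : List (Int × List Int)) (start : Int) (out : Int) : Prop := out = oxy_alt connections start
instance (connections : List (Int × List Int)) (start : Int) (out : Int) : Decidable (Spec_oxy connections start out) := by unfold Spec_oxy; infer_instance

-- ===== CLAIM (what is proved, stated in full; the proofs are below) =====
def Claim_equal_oxy : Prop := ∀ (connections : List (Int × List Int)) (start : Int), Dom_oxy connections start → Pre_oxy connections start → Spec_oxy connections start (oxy connections start)

-- ===== LEMMAS AND PROOFS =====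

theorem pv_fold_mem (hasAir : PySem.Set Int) (ns : List Int) :
    ∀ (na no : PySem.Set Int) (x : Int),
      (x ∈ (ns.foldl (fun (p : PySem.Set Int × PySem.Set Int) nb =>
              if nb ∈ hasAir then p else (PySem.Set.add p.1 nb, PySem.Set.discard p.2 nb)) (na, no)).1
        ↔ x ∈ na ∨ (x ∈ ns ∧ x ∉ hasAir)) ∧
      (x ∈ (ns.foldl (fun (p : PySem.Set Int × PySem.Set Int) nb =>
              if nb ∈ hasAir then p else (PySem.Set.add p.1 nb, PySem.Set.discard p.2 nb)) (na, no)).2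
        ↔ x ∈ no ∧ ¬(x ∈ ns ∧ x ∉ hasAir)) := by
  induction ns with
  | nil => intro na no x; simp
  | cons n ns ih =>
    intro na no x
    simp only [List.foldl_cons]
    by_cases hn : n ∈ hasAir
    · simp only [if_pos hn]
      constructor
      · rw [(ih na no x).1]
        constructor
        · rintro (h | ⟨h1, h2⟩)
          · exact Or.inl h
          · exact Or.inr ⟨List.mem_cons_of_mem _ h1, h2⟩
        · rintro (h | ⟨h1, h2⟩)
          · exact Or.inl h
          · rcases List.mem_cons.mp h1 with rfl | h1
            · exact absurd hn h2
            · exact Or.inr ⟨h1, h2⟩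
      · rw [(ih na no x).2]
        simp only [List.mem_cons]
        constructor
        · rintro ⟨h1, h2⟩; exact ⟨h1, fun ⟨hc, hh⟩ => h2 ⟨hc.resolve_left (fun e => hh (e ▸ hn)), hh⟩⟩
        · rintro ⟨h1, h2⟩; exact ⟨h1, fun ⟨hc, hh⟩ => h2 ⟨Or.inr hc, hh⟩⟩
    · simp only [if_neg hn]
      have h1 := (ih (PySem.Set.add na n) (PySem.Set.discard no n) x).1
      have h2 := (ih (PySem.Set.add na n) (PySem.Set.discard no n) x).2
      constructor
      · rw [h1, PySem.Set.mem_add]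
        simp only [List.mem_cons]
        constructor
        · rintro ((h | rfl) | ⟨h, hh⟩)
          · exact Or.inl h
          · exact Or.inr ⟨Or.inl rfl, hn⟩
          · exact Or.inr ⟨Or.inr h, hh⟩
        · rintro (h | ⟨(rfl | h), hh⟩)
          · exact Or.inl (Or.inl h)
          · exact Or.inl (Or.inr rfl)
          · exact Or.inr ⟨h, hh⟩
      · rw [h2, PySem.Set.mem_discard]
        simp only [List.mem_cons]
        constructor
        · rintro ⟨⟨h1, hne⟩, h2⟩
          exact ⟨h1, fun ⟨hc, hh⟩ => hc.elim (fun e => hne e) (fun hc => h2 ⟨hc, hh⟩)⟩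
        · rintro ⟨h1, h2⟩
          refine ⟨⟨h1, fun e => h2 ⟨Or.inl e, e ▸ hn⟩⟩, fun ⟨hc, hh⟩ => h2 ⟨Or.inr hc, hh⟩⟩

theorem pv_inner_mem (d : PySem.Dict Int (List Int)) (hasAir : PySem.Set Int) :
    ∀ (rs : List Int) (na no : PySem.Set Int) (x : Int),
      (x ∈ (oxyInner d hasAir rs na no).1
        ↔ x ∈ na ∨ ((∃ r ∈ rs, x ∈ d.getD r []) ∧ x ∉ hasAir)) ∧
      (x ∈ (oxyInner d hasAir rs na no).2
        ↔ x ∈ no ∧ ¬((∃ r ∈ rs, x ∈ d.getD r []) ∧ x ∉ hasAir)) := by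
  intro rs
  induction rs with
  | nil => intro na no x; simp [oxyInner]
  | cons r rest ih =>
    intro na no x
    simp only [oxyInner]
    have hf := pv_fold_mem hasAir (d.getD r []) na no x
    set q := (d.getD r []).foldl
        (fun (p : PySem.Set Int × PySem.Set Int) nb =>
          if nb ∈ hasAir then p else (PySem.Set.add p.1 nb, PySem.Set.discard p.2 nb))
        (na, no) with hq
    have h1 := (ih q.1 q.2 x).1
    have h2 := (ih q.1 q.2 x).2
    constructor
    · rw [h1, hf.1]
      simp only [List.mem_cons]
      constructor
      · rintro ((h | ⟨h, hh⟩) | ⟨⟨s, hs, hx⟩, hh⟩)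
        · exact Or.inl h
        · exact Or.inr ⟨⟨r, Or.inl rfl, h⟩, hh⟩
        · exact Or.inr ⟨⟨s, Or.inr hs, hx⟩, hh⟩
      · rintro (h | ⟨⟨s, (rfl | hs), hx⟩, hh⟩)
        · exact Or.inl (Or.inl h)
        · exact Or.inl (Or.inr ⟨hx, hh⟩)
        · exact Or.inr ⟨⟨s, hs, hx⟩, hh⟩
    · rw [h2, hf.2]
      simp only [List.mem_cons]
      constructor
      · rintro ⟨⟨h1', h2'⟩, h3⟩
        refine ⟨h1', ?_⟩
        rintro ⟨⟨s, (rfl | hs), hx⟩, hh⟩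
        · exact h2' ⟨hx, hh⟩
        · exact h3 ⟨⟨s, hs, hx⟩, hh⟩
      · rintro ⟨h1', h2'⟩
        refine ⟨⟨h1', fun ⟨hx, hh⟩ => h2' ⟨⟨r, Or.inl rfl, hx⟩, hh⟩⟩, ?_⟩
        rintro ⟨⟨s, hs, hx⟩, hh⟩
        exact h2' ⟨⟨s, Or.inr hs, hx⟩, hh⟩

theorem pv_loop_eq (d : PySem.Dict Int (List Int)) :
    ∀ (n : Nat) (hasAir front noAir seen : PySem.Set Int) (t : Nat),
      d.size + 1 - t ≤ n →
      (∀ x : Int, x ∈ seen ↔ x ∈ hasAir ∨ x ∈ front) →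
      (∀ x : Int, x ∈ noAir ↔ x ∈ d.keys ∧ ¬(x ∈ hasAir ∨ x ∈ front)) →
      (∀ r ∈ hasAir, ∀ nb ∈ d.getD r [], nb ∈ hasAir ∨ nb ∈ front) →
      oxyLoop d hasAir front noAir t = altLoop d (PySem.Set.ofList d.keys) seen t := by
  intro n
  induction n with
  | zero =>
    intro hasAir front noAir seen t hn h1 h2 h3
    rw [oxyLoop, altLoop]
    by_cases hg : noAir = []
    · have hsub : PySem.Set.issubset (PySem.Set.ofList d.keys) seen = true := by
        rw [PySem.Set.issubset_iff]
        intro x hx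
        rw [PySem.Set.mem_ofList] at hx
        rw [h1]
        by_contra hc
        exact (List.eq_nil_iff_forall_not_mem.mp hg x) ((h2 x).mpr ⟨hx, hc⟩)
      rw [if_pos hg, if_pos hsub]
    · have hsub : ¬ (PySem.Set.issubset (PySem.Set.ofList d.keys) seen = true) := by
        intro hs
        apply hg
        rw [List.eq_nil_iff_forall_not_mem]
        intro x hx
        rcases (h2 x).mp hx with ⟨hk, hns⟩
        exact hns ((h1 x).mp ((PySem.Set.issubset_iff _ _).mp hs x ((PySem.Set.mem_ofList _ _).mpr hk)))
      rw [if_neg hg, if_neg hsub]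
      have ht : t + 1 > d.size := by omega
      rw [dif_pos ht, dif_pos ht]
  | succ n ih =>
    intro hasAir front noAir seen t hn h1 h2 h3
    rw [oxyLoop, altLoop]
    by_cases hg : noAir = []
    · have hsub : PySem.Set.issubset (PySem.Set.ofList d.keys) seen = true := by
        rw [PySem.Set.issubset_iff]
        intro x hx
        rw [PySem.Set.mem_ofList] at hx
        rw [h1]
        by_contra hc
        exact (List.eq_nil_iff_forall_not_mem.mp hg x) ((h2 x).mpr ⟨hx, hc⟩)
      rw [if_pos hg, if_pos hsub]
    · have hsub : ¬ (PySem.Set.issubset (PySem.Set.ofList d.keys) seen = true) := by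
        intro hs
        apply hg
        rw [List.eq_nil_iff_forall_not_mem]
        intro x hx
        rcases (h2 x).mp hx with ⟨hk, hns⟩
        exact hns ((h1 x).mp ((PySem.Set.issubset_iff _ _).mp hs x ((PySem.Set.mem_ofList _ _).mpr hk)))
      rw [if_neg hg, if_neg hsub]
      by_cases ht : t + 1 > d.size
      · rw [dif_pos ht, dif_pos ht]
      · rw [dif_neg ht, dif_neg ht]
        set hasAir' := PySem.Set.update hasAir front with hA
        set p := oxyInner d hasAir' front PySem.Set.empty noAir with hp
        set seen' := PySem.Set.union seen (seen.flatMap (fun r => d.getD r [])) with hs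
        have hmemA' : ∀ x : Int, x ∈ hasAir' ↔ x ∈ hasAir ∨ x ∈ front := by
          intro x; rw [hA, PySem.Set.mem_update]
        have hmem1 : ∀ x : Int, x ∈ p.1 ↔ ((∃ r ∈ front, x ∈ d.getD r []) ∧ x ∉ hasAir') := by
          intro x
          rw [hp, (pv_inner_mem d hasAir' front PySem.Set.empty noAir x).1]
          simp [PySem.Set.empty]
        have hmem2 : ∀ x : Int, x ∈ p.2 ↔ x ∈ noAir ∧ ¬((∃ r ∈ front, x ∈ d.getD r []) ∧ x ∉ hasAir') := by
          intro x
          rw [hp, (pv_inner_mem d hasAir' front PySem.Set.empty noAir x).2]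
        have hmemS : ∀ x : Int, x ∈ seen' ↔ x ∈ seen ∨ ∃ r ∈ seen, x ∈ d.getD r [] := by
          intro x
          rw [hs, PySem.Set.mem_union, List.mem_flatMap]
        apply ih hasAir' p.1 p.2 seen' (t + 1) (by omega)
        · -- h1'
          intro x
          rw [hmemS x, hmem1 x, hmemA' x]
          constructor
          · rintro (hx | ⟨r, hr, hx⟩)
            · exact Or.inl ((h1 x).mp hx)
            · rcases (h1 r).mp hr with hrA | hrF
              · exact Or.inl (h3 r hrA x hx)
              · by_cases hxA : x ∈ hasAir'
                · exact Or.inl ((hmemA' x).mp hxA)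
                · exact Or.inr ⟨⟨r, hrF, hx⟩, fun h => hxA ((hmemA' x).mpr h)⟩
          · rintro (h | ⟨⟨r, hrF, hx⟩, _⟩)
            · exact Or.inl ((h1 x).mpr h)
            · exact Or.inr ⟨r, (h1 r).mpr (Or.inr hrF), hx⟩
        · -- h2'
          intro x
          rw [hmem2 x, h2 x, hmem1 x, hmemA' x]
          by_cases hxA : x ∈ hasAir'
          · have := (hmemA' x).mp hxA
            constructor
            · rintro ⟨⟨_, hns⟩, _⟩; exact absurd this hns
            · rintro ⟨_, hns⟩; exact absurd (Or.inl this) hns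
          · have hnx : ¬(x ∈ hasAir ∨ x ∈ front) := fun h => hxA ((hmemA' x).mpr h)
            constructor
            · rintro ⟨⟨hk, _⟩, hnn⟩
              refine ⟨hk, ?_⟩
              rintro (h | hP)
              · exact hxA ((hmemA' x).mpr h)
              · exact hnn ⟨hP.1, hP.2⟩
            · rintro ⟨hk, hns⟩
              refine ⟨⟨hk, hnx⟩, ?_⟩
              rintro ⟨hN, hA2⟩
              exact hns (Or.inr ⟨hN, hA2⟩)
        · -- h3'
          intro r hr nb hnb
          rcases (hmemA' r).mp hr with hrA | hrF
          · exact Or.inl ((hmemA' nb).mpr (h3 r hrA nb hnb))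
          · by_cases hnbA : nb ∈ hasAir'
            · exact Or.inl hnbA
            · exact Or.inr ((hmem1 nb).mpr ⟨⟨r, hrF, hnb⟩, hnbA⟩)

-- ===== VERDICT (by name: the statement is the Claim_ definition above) =====
theorem oxy_spec : Claim_equal_oxy := by
  intro connections start _hdom _hpre
  unfold Spec_oxy oxy oxy_alt
  show oxyLoop (PySem.Dict.ofList connections) PySem.Set.empty (PySem.Set.ofList [start])
      (PySem.Set.diff (PySem.Set.ofList (PySem.Dict.ofList connections).keys)
        (PySem.Set.ofList [start])) 0 =
    (if PySem.Set.diff (PySem.Set.ofList (PySem.Dict.ofList connections).keys)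
        (PySem.Set.ofList [start]) = [] then 0
     else altLoop (PySem.Dict.ofList connections)
        (PySem.Set.ofList (PySem.Dict.ofList connections).keys) (PySem.Set.ofList [start]) 0)
  by_cases hd : PySem.Set.diff (PySem.Set.ofList (PySem.Dict.ofList connections).keys)
      (PySem.Set.ofList [start]) = []
  · rw [if_pos hd, hd, oxyLoop, if_pos rfl]
    norm_num
  · rw [if_neg hd]
    apply pv_loop_eq (PySem.Dict.ofList connections) ((PySem.Dict.ofList connections).size + 1)
      _ _ _ _ 0 (by omega)
    · intro x; simp [PySem.Set.empty]
    · intro x; simp [PySem.Set.mem_diff, PySem.Set.mem_ofList, PySem.Set.empty]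
    · intro r hr; simp [PySem.Set.empty] at hr
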